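-- pv_equiv track=rewrite | github.com/KimJonghoSNU/Abstraction_gap | scripts/tree_builder/snowflake_litellm/utils.py | get_model_account_mapping
-- ===== SOURCE A (Python) =====
-- from typing import Dict, List, Optional, Tuple
--
-- def get_model_account_mapping(
--     model_name: str, available_accounts: List[str]
-- ) -> Optional[str]:
--     """
--     모델명에서 계정 정보를 추출합니다.
--
--     Args:
--         model_name: 모델명 (예: "snowflake/mistral-7b-dev")
--         available_accounts: 사용 가능한 계정 목록
--
--     Returns:
--         Optional[str]: 매핑된 계정 별칭
--     """
--     # snowflake/ 접두사 제거
--     clean_model = model_name.replace("snowflake/", "")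
--
--     # 계정 suffix 확인
--     for suffix in ["-dev", "-test", "-prod", "-staging"]:
--         if clean_model.endswith(suffix):
--             account_alias = suffix[1:]  # - 제거
--             if account_alias in available_accounts:
--                 return account_alias
--
--     # 기본 계정 반환
--     if "main" in available_accounts:
--         return "main"
--     elif available_accounts:
--         return available_accounts[0]
--
--     return None
-- ===== SOURCE B (Python) =====
-- def get_model_account_mapping(model_name, available_accounts):
--     clean_model = model_name.replace("snowflake/", "")
--     parts = clean_model.rsplit("-", 1)
--     if len(parts) == 2:
--         candidate = parts[1]
--         if candidate in ("dev", "test", "prod", "staging") and candidate in available_accounts: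
--             return candidate
--     if "main" in available_accounts:
--         return "main"
--     if available_accounts:
--         return available_accounts[0]
--     return None
-- ===== Notes on version B (the rewrite author's own statement) =====
-- stated objective: idiomatic
-- what changed: Replaces the loop over four '-suffix' strings of endswith tests by a single rsplit('-',1) extraction of the trailing dash-segment followed by two membership tests; the fallback chain is unchanged.
import Mathlib
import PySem

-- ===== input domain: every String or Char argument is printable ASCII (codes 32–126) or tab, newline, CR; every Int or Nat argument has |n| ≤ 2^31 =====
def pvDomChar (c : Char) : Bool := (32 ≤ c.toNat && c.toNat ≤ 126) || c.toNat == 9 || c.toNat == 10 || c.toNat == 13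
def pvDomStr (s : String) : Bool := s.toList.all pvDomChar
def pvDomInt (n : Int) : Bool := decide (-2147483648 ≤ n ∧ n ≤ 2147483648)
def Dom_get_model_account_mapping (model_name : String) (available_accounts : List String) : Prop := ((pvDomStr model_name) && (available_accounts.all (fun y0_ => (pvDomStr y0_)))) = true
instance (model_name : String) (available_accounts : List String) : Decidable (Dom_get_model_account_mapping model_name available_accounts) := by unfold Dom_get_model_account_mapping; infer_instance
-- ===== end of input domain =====

-- B replaces A's loop of four endswith tests by one rsplit('-',1) segment extraction plus membership tests (idiomatic; same cost).

-- ===== PORT A =====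
-- the 'for suffix in [...]' loop with its early returns, as first-match recursion over the suffix list
def pvSuffixLoop (clean_model : String) (available_accounts : List String) : List String → Option String
  | [] => none
  | suffix :: rest =>
    if PySem.Str.endswith clean_model suffix then
      -- account_alias = suffix[1:]
      let account_alias := String.ofList (PySem.List.slice suffix.toList (some 1) none)
      if available_accounts.contains account_alias then some account_alias
      else pvSuffixLoop clean_model available_accounts rest
    else pvSuffixLoop clean_model available_accounts rest

def get_model_account_mapping (model_name : String) (available_accounts : List String) : Option String :=
  let clean_model := PySem.Str.replace model_name "snowflake/" ""
  match pvSuffixLoop clean_model available_accounts ["-dev", "-test", "-prod", "-staging"] with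
  | some a => some a
  | none =>
    if available_accounts.contains "main" then some "main"
    else match available_accounts with
      | [] => none
      | a :: _ => some a

-- ===== PORT B =====
def get_model_account_mapping_alt (model_name : String) (available_accounts : List String) : Option String :=
  let clean_model := PySem.Str.replace model_name "snowflake/" ""
  -- clean_model.rsplit("-", 1), ported by hand (exact): it has two parts iff '-' occurs in
  -- clean_model, and then parts[1] is the run of non-'-' characters at the end of the string.
  let rev := clean_model.toList.reverse
  let seg := rev.takeWhile (fun c => !decide (c = '-'))
  let hit : Option String :=
    if seg.length < rev.length then
      let candidate := String.ofList seg.reverse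
      if (["dev", "test", "prod", "staging"].contains candidate && available_accounts.contains candidate) then
        some candidate
      else none
    else none
  match hit with
  | some a => some a
  | none =>
    if available_accounts.contains "main" then some "main"
    else match available_accounts with
      | [] => none
      | a :: _ => some a

-- ===== PRECONDITION & SPEC =====
def Spec_get_model_account_mapping (model_name : String) (available_accounts : List String) (out : Option String) : Prop := out = get_model_account_mapping_alt model_name available_accounts
instance (model_name : String) (available_accounts : List String) (out : Option String) : Decidable (Spec_get_model_account_mapping model_name available_accounts out) := by unfold Spec_get_model_account_mapping; infer_instance

-- ===== CLAIM (what is proved, stated in full; the proofs are below) =====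
def Claim_equal_get_model_account_mapping : Prop := ∀ (model_name : String) (available_accounts : List String), Dom_get_model_account_mapping model_name available_accounts → Spec_get_model_account_mapping model_name available_accounts (get_model_account_mapping model_name available_accounts)


-- ===== LEMMAS AND PROOFS =====

-- takeWhile over a dash-free prefix followed by the stopping char
lemma pv_takeWhile_clean_append (p t : List Char) (hp : '-' ∉ p) :
    (p ++ '-' :: t).takeWhile (fun c => !decide (c = '-')) = p := by
  induction p with
  | nil => rw [List.nil_append, List.takeWhile_cons, if_neg (by simp)]
  | cons a p ih =>
    simp only [List.mem_cons, not_or] at hp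
    rw [List.cons_append, List.takeWhile_cons, if_pos (by simpa using Ne.symm hp.1), ih hp.2]

lemma pv_takeWhile_eq_self_iff (rev : List Char) :
    rev.takeWhile (fun c => !decide (c = '-')) = rev ↔ '-' ∉ rev := by
  rw [List.takeWhile_eq_self_iff]
  constructor
  · intro h hm
    have := h _ hm
    simp at this
  · intro hm a ha
    simp only [Bool.not_eq_true', decide_eq_false_iff_not]
    exact fun he => hm (he ▸ ha)

lemma pv_takeWhile_lt_iff (rev : List Char) :
    (rev.takeWhile (fun c => !decide (c = '-'))).length < rev.length ↔ '-' ∈ rev := by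
  have hle : (rev.takeWhile (fun c => !decide (c = '-'))).length ≤ rev.length :=
    (List.takeWhile_prefix _).length_le
  constructor
  · intro h
    by_contra hm
    rw [(pv_takeWhile_eq_self_iff rev).mpr hm] at h
    omega
  · intro hm
    rcases Nat.lt_or_ge (rev.takeWhile (fun c => !decide (c = '-'))).length rev.length with h | h
    · exact h
    · exfalso
      have heq := (List.takeWhile_prefix (l := rev) (p := fun c => !decide (c = '-'))).eq_of_length
        (Nat.le_antisymm hle h)
      exact (pv_takeWhile_eq_self_iff rev).mp heq hm

-- endswith ('-' :: s) characterised by the trailing dash-free segment (s contains no '-')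
lemma pv_ends (cl s : List Char) (hs : '-' ∉ s) :
    PySem.Chars.endswith cl ('-' :: s) =
      (decide ('-' ∈ cl.reverse) && (cl.reverse.takeWhile (fun c => !decide (c = '-')) == s.reverse)) := by
  apply Bool.eq_iff_iff.mpr
  rw [PySem.Chars.endswith_iff]
  simp only [Bool.and_eq_true, decide_eq_true_eq, beq_iff_eq]
  rw [← List.reverse_prefix, List.reverse_cons]
  constructor
  · rintro ⟨t, ht⟩
    rw [List.append_assoc, List.singleton_append] at ht
    refine ⟨?_, ?_⟩
    · rw [← ht]
      exact List.mem_append_right _ (List.mem_cons_self ..)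
    · rw [← ht, pv_takeWhile_clean_append _ _ (by simpa using hs)]
  · rintro ⟨hm, hseg⟩
    have hd : cl.reverse = s.reverse ++ cl.reverse.dropWhile (fun c => !decide (c = '-')) := by
      rw [← hseg, List.takeWhile_append_dropWhile]
    have hne : cl.reverse.dropWhile (fun c => !decide (c = '-')) ≠ [] := by
      intro h
      have : cl.reverse.takeWhile (fun c => !decide (c = '-')) = cl.reverse := by
        conv_rhs => rw [← List.takeWhile_append_dropWhile (p := fun c => !decide (c = '-')) (l := cl.reverse)]
        rw [h, List.append_nil]
      exact (pv_takeWhile_eq_self_iff cl.reverse).mp this hm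
    rcases List.exists_cons_of_ne_nil hne with ⟨c, t, hct⟩
    have hc : c = '-' := by
      have h2 := List.head_dropWhile_not (l := cl.reverse) (p := fun c => !decide (c = '-')) hne
      simp only [hct, List.head_cons] at h2
      simpa using h2
    exact ⟨t, by rw [List.append_assoc, List.singleton_append, ← hc, ← hct, ← hd]⟩

-- endswith on the four literal suffixes, at the String level
lemma pv_ends_str (clean : String) (suf s : String) (hsl : suf.toList = '-' :: s.toList)
    (hs : '-' ∉ s.toList) :
    PySem.Str.endswith clean suf =
      (decide ('-' ∈ clean.toList.reverse) &&
        (clean.toList.reverse.takeWhile (fun c => !decide (c = '-')) == s.toList.reverse)) := by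
  rw [PySem.Str.endswith_eq, hsl, pv_ends _ _ hs]

-- ===== VERDICT (by name: the statement is the Claim_ definition above) =====
theorem get_model_account_mapping_spec : Claim_equal_get_model_account_mapping := by
  intro model_name available_accounts _
  unfold Spec_get_model_account_mapping
  unfold get_model_account_mapping get_model_account_mapping_alt
  simp only [pvSuffixLoop]
  rw [pv_ends_str _ "-dev" "dev" (by decide) (by decide),
      pv_ends_str _ "-test" "test" (by decide) (by decide),
      pv_ends_str _ "-prod" "prod" (by decide) (by decide),
      pv_ends_str _ "-staging" "staging" (by decide) (by decide)]
  rw [show String.ofList (PySem.List.slice "-dev".toList (some 1) none) = "dev" by decide,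
      show String.ofList (PySem.List.slice "-test".toList (some 1) none) = "test" by decide,
      show String.ofList (PySem.List.slice "-prod".toList (some 1) none) = "prod" by decide,
      show String.ofList (PySem.List.slice "-staging".toList (some 1) none) = "staging" by decide]
  generalize (PySem.Str.replace model_name "snowflake/" "").toList.reverse = rev
  by_cases hm : '-' ∈ rev
  · rw [if_pos ((pv_takeWhile_lt_iff rev).mpr hm)]
    simp only [hm, decide_true, Bool.true_and]
    set seg := rev.takeWhile (fun c => !decide (c = '-'))
    by_cases h1 : seg = (['v', 'e', 'd'] : List Char)
    · simp [h1, show String.ofList ['d', 'e', 'v'] = "dev" by decide]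
    · by_cases h2 : seg = (['t', 's', 'e', 't'] : List Char)
      · simp [h2, show String.ofList ['t', 'e', 's', 't'] = "test" by decide]
      · by_cases h3 : seg = (['d', 'o', 'r', 'p'] : List Char)
        · simp [h3, show String.ofList ['p', 'r', 'o', 'd'] = "prod" by decide]
        · by_cases h4 : seg = (['g', 'n', 'i', 'g', 'a', 't', 's'] : List Char)
          · simp [h4,
              show String.ofList ['s', 't', 'a', 'g', 'i', 'n', 'g'] = "staging" by decide]
          · have hc : ∀ t ∈ (["dev", "test", "prod", "staging"] : List String),
                String.ofList seg.reverse ≠ t := by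
              intro t ht
              fin_cases ht <;> intro he <;>
                [exact h1 (by simpa using congrArg (fun x => x.toList.reverse) he);
                 exact h2 (by simpa using congrArg (fun x => x.toList.reverse) he);
                 exact h3 (by simpa using congrArg (fun x => x.toList.reverse) he);
                 exact h4 (by simpa using congrArg (fun x => x.toList.reverse) he)]
            simp [h1, h2, h3, h4, List.contains_eq_mem, hc]
  · have hlt : ¬ ((List.takeWhile (fun c => !decide (c = '-')) rev).length < rev.length) :=
      fun h => hm ((pv_takeWhile_lt_iff rev).mp h)
    simp [hm, hlt]
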